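-- pv_equiv track=rewrite | github.com/yosef147yosef/License-Generator-PC-IDs-based-verification | python_files/Protected_Software_Generator_64bits.py | filter_blocks_by_relocations
-- ===== SOURCE A (Python) =====
-- def filter_blocks_by_relocations(ranges, relocation_addresses):
--     filtered_ranges = []
--     for start, end in ranges:
--         block_size = end - start
--         expected_relocs = block_size // 8  # Changed from 4 to 8 for 64-bit
--         relocs_in_block = sum(1 for addr in relocation_addresses if start <= addr < end)
--         if relocs_in_block < expected_relocs:
--             filtered_ranges.append((start, end))
--     return filtered_ranges
-- ===== SOURCE B (Python) =====
-- def filter_blocks_by_relocations(ranges, relocation_addresses):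
--     s = sorted(relocation_addresses)
--
--     def bisect_left(x):
--         lo, hi = 0, len(s)
--         while lo < hi:
--             mid = (lo + hi) // 2
--             if s[mid] < x:
--                 lo = mid + 1
--             else:
--                 hi = mid
--         return lo
--
--     return [(start, end) for start, end in ranges
--             if start < end
--             and bisect_left(end) - bisect_left(start) < (end - start) // 8]
-- ===== Notes on version B (the rewrite author's own statement) =====
-- stated objective: faster
-- what changed: Sort the relocation addresses once and count addresses in each range with binary search (bisect_left(end)-bisect_left(start)) instead of rescanning the whole address list for every range.
import Mathlib
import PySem

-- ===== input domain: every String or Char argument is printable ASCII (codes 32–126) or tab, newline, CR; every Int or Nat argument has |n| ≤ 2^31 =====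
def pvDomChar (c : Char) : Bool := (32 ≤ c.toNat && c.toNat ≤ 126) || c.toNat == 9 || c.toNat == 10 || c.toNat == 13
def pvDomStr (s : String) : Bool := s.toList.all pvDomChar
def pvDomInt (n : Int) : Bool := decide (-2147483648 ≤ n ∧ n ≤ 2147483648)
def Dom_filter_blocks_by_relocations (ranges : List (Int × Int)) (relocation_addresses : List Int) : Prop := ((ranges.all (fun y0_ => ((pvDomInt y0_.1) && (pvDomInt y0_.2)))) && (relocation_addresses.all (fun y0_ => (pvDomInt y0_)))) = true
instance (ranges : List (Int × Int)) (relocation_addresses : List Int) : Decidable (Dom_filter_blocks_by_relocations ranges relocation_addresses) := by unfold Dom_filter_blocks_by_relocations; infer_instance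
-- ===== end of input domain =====

-- B sorts the relocation addresses once and counts addresses per range with binary search
-- instead of rescanning the whole address list for every range.


-- ===== PORT A =====
def filter_blocks_by_relocations (ranges : List (Int × Int)) (relocation_addresses : List Int) : List (Int × Int) :=
  ranges.foldl (fun filtered_ranges se =>
    let start := se.1
    let end_ := se.2
    let block_size := end_ - start
    let expected_relocs := PySem.Int.floordiv block_size 8
    let relocs_in_block :=
      relocation_addresses.foldl
        (fun acc addr => if start ≤ addr ∧ addr < end_ then acc + 1 else acc) (0 : Int)
    if relocs_in_block < expected_relocs then filtered_ranges ++ [(start, end_)] else filtered_ranges) []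

-- ===== PORT B =====
-- hand-written bisect_left from Source B: the while-loop binary search on the sorted list
-- (lo/hi are nonnegative in Python, so they are Nat here; (lo+hi)//2 on nonnegatives is Nat division;
--  s[mid] is always in range since mid < hi ≤ len(s), so getD is exact)
def pvBlAux (s : List Int) (x : Int) (lo hi : Nat) : Nat :=
  if h : lo < hi then
    if s.getD ((lo + hi) / 2) 0 < x then pvBlAux s x ((lo + hi) / 2 + 1) hi
    else pvBlAux s x lo ((lo + hi) / 2)
  else lo
termination_by hi - lo
decreasing_by all_goals omega

def pvBisectLeft (s : List Int) (x : Int) : Nat := pvBlAux s x 0 s.length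

def filter_blocks_by_relocations_alt (ranges : List (Int × Int)) (relocation_addresses : List Int) : List (Int × Int) :=
  let s := PySem.List.sorted relocation_addresses (fun a => a) false
  ranges.filter (fun se =>
    decide (se.1 < se.2) &&
    decide ((pvBisectLeft s se.2 : Int) - (pvBisectLeft s se.1 : Int) < PySem.Int.floordiv (se.2 - se.1) 8))

-- ===== PRECONDITION & SPEC =====
def Spec_filter_blocks_by_relocations (ranges : List (Int × Int)) (relocation_addresses : List Int) (out : List (Int × Int)) : Prop := out = filter_blocks_by_relocations_alt ranges relocation_addresses
instance (ranges : List (Int × Int)) (relocation_addresses : List Int) (out : List (Int × Int)) : Decidable (Spec_filter_blocks_by_relocations ranges relocation_addresses out) := by unfold Spec_filter_blocks_by_relocations; infer_instance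

-- ===== CLAIM (what is proved, stated in full; the proofs are below) =====
def Claim_equal_filter_blocks_by_relocations : Prop := ∀ (ranges : List (Int × Int)) (relocation_addresses : List Int), Dom_filter_blocks_by_relocations ranges relocation_addresses → Spec_filter_blocks_by_relocations ranges relocation_addresses (filter_blocks_by_relocations ranges relocation_addresses)

-- ===== LEMMAS AND PROOFS =====

-- In a ≤-sorted list, the element at index j is < x iff j is below the count of elements < x.
theorem pv_sorted_lt_iff (s : List Int) (x : Int)
    (hs : s.Pairwise (fun a b => a ≤ b)) (j : Nat) (hj : j < s.length) :
    (s[j] < x ↔ j < s.countP (fun a => decide (a < x))) := by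
  induction s generalizing j with
  | nil => simp at hj
  | cons a t ih =>
    rcases List.pairwise_cons.1 hs with ⟨ha, ht⟩
    by_cases hax : a < x
    · cases j with
      | zero => simp [hax]
      | succ j =>
        have hjt : j < t.length := by simp at hj; omega
        have := ih ht j hjt
        simpa [List.countP_cons, hax, Nat.succ_lt_succ_iff] using this
    · have hz : t.countP (fun a => decide (a < x)) = 0 := by
        rw [List.countP_eq_zero]
        intro b hb
        simp only [decide_eq_true_eq]
        exact fun hbx => hax (lt_of_le_of_lt (ha b hb) hbx)
      cases j with
      | zero => simp [hax, hz]
      | succ j =>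
        have hjt : j < t.length := by simp at hj; omega
        have hm : t[j] ∈ t := List.getElem_mem hjt
        have hnlt : ¬ t[j] < x := fun h => hax (lt_of_le_of_lt (ha _ hm) h)
        simp [hax, hz, hnlt]

-- the binary search returns the count of elements < x whenever that count lies in [lo, hi]
theorem pvBlAux_eq (s : List Int) (x : Int) (hs : s.Pairwise (fun a b => a ≤ b))
    (lo hi : Nat) (hlo : lo ≤ s.countP (fun a => decide (a < x)))
    (hhi : s.countP (fun a => decide (a < x)) ≤ hi) (hlen : hi ≤ s.length) :
    pvBlAux s x lo hi = s.countP (fun a => decide (a < x)) := by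
  rw [pvBlAux]
  split
  · next h =>
    have hmidlt : (lo + hi) / 2 < s.length := by omega
    have hget : s.getD ((lo + hi) / 2) 0 = s[(lo + hi) / 2] := List.getD_eq_getElem s 0 hmidlt
    have hiff := pv_sorted_lt_iff s x hs ((lo + hi) / 2) hmidlt
    split
    · next hlt =>
      rw [hget] at hlt
      have := hiff.1 hlt
      exact pvBlAux_eq s x hs _ hi (by omega) hhi hlen
    · next hlt =>
      rw [hget] at hlt
      have : ¬ ((lo + hi) / 2 < s.countP (fun a => decide (a < x))) := fun hc => hlt (hiff.2 hc)
      exact pvBlAux_eq s x hs lo _ hlo (by omega) (by omega)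
  · next h => omega
termination_by hi - lo
decreasing_by all_goals omega

theorem pvBisectLeft_eq (s : List Int) (x : Int) (hs : s.Pairwise (fun a b => a ≤ b)) :
    pvBisectLeft s x = s.countP (fun a => decide (a < x)) := by
  have := List.countP_le_length (l := s) (p := fun a => decide (a < x))
  exact pvBlAux_eq s x hs 0 s.length (by omega) this le_rfl

-- counting split: for start ≤ end, #(< end) = #(< start) + #(start ≤ · < end)
theorem pv_count_split (l : List Int) (st en : Int) (h : st ≤ en) :
    l.countP (fun a => decide (a < en)) =
      l.countP (fun a => decide (a < st)) + l.countP (fun a => decide (st ≤ a ∧ a < en)) := by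
  induction l with
  | nil => simp
  | cons a t ih =>
    simp only [List.countP_cons, ih, decide_eq_true_eq]
    by_cases h1 : a < en <;> by_cases h2 : a < st <;> by_cases h3 : st ≤ a <;>
      simp only [h1, h2, h3, if_true, if_false, and_true, and_false] <;> omega

-- the two per-range conditions coincide
theorem pv_cond_eq (relocs : List Int) (st en : Int) :
    ((relocs.foldl (fun acc addr => if st ≤ addr ∧ addr < en then acc + 1 else acc) (0 : Int)) <
        PySem.Int.floordiv (en - st) 8) ↔
      ((decide (st < en) &&
        decide ((pvBisectLeft (PySem.List.sorted relocs (fun a => a) false) en : Int) -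
            (pvBisectLeft (PySem.List.sorted relocs (fun a => a) false) st : Int) <
          PySem.Int.floordiv (en - st) 8)) = true) := by
  set s := PySem.List.sorted relocs (fun a => a) false with hsdef
  have hs : s.Pairwise (fun a b => a ≤ b) := by
    simpa using PySem.List.sorted_pairwise relocs (fun a => a)
  have hperm : s.Perm relocs := PySem.List.sorted_perm relocs (fun a => a) false
  have hfold : relocs.foldl (fun acc addr => if st ≤ addr ∧ addr < en then acc + 1 else acc) (0 : Int)
      = (relocs.countP (fun a => decide (st ≤ a ∧ a < en)) : Int) := by
    have := PySem.List.foldl_ite_add_one (fun a => st ≤ a ∧ a < en) relocs (0 : Int)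
    simpa using this
  by_cases hse : st < en
  · have hsplit := pv_count_split s st en (le_of_lt hse)
    have hb₁ := pvBisectLeft_eq s en hs
    have hb₂ := pvBisectLeft_eq s st hs
    have hcp : s.countP (fun a => decide (st ≤ a ∧ a < en)) = relocs.countP (fun a => decide (st ≤ a ∧ a < en)) :=
      hperm.countP_eq _
    simp only [hfold, hb₁, hb₂, hsplit, hcp, hse, decide_true, Bool.true_and, decide_eq_true_eq]
    constructor <;> intro h <;> [push_cast; push_cast at h] <;> omega
  · have hz : relocs.countP (fun a => decide (st ≤ a ∧ a < en)) = 0 := by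
      rw [List.countP_eq_zero]; intro b hb; simp only [decide_eq_true_eq]; omega
    have hfd : PySem.Int.floordiv (en - st) 8 ≤ 0 := by
      simp only [PySem.Int.floordiv, Int.fdiv_eq_ediv]; omega
    simp only [hfold, hz, hse, decide_false, Bool.false_and, Int.natCast_zero]
    constructor
    · intro h; omega
    · intro h; exact absurd h Bool.false_ne_true

-- ===== VERDICT (by name: the statement is the Claim_ definition above) =====
theorem filter_blocks_by_relocations_spec : Claim_equal_filter_blocks_by_relocations := by
  intro ranges relocs _
  unfold Spec_filter_blocks_by_relocations filter_blocks_by_relocations filter_blocks_by_relocations_alt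
  simp only []
  have hfun : (fun (filtered : List (Int × Int)) (se : Int × Int) =>
      if (relocs.foldl (fun acc addr => if se.1 ≤ addr ∧ addr < se.2 then acc + 1 else acc) (0 : Int)) <
          PySem.Int.floordiv (se.2 - se.1) 8
      then filtered ++ [(se.1, se.2)] else filtered)
      = (fun (filtered : List (Int × Int)) (se : Int × Int) =>
        if (decide (se.1 < se.2) &&
            decide ((pvBisectLeft (PySem.List.sorted relocs (fun a => a) false) se.2 : Int) -
                (pvBisectLeft (PySem.List.sorted relocs (fun a => a) false) se.1 : Int) <
              PySem.Int.floordiv (se.2 - se.1) 8)) = true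
        then filtered ++ [se] else filtered) := by
    funext filtered se
    rcases pv_cond_eq relocs se.1 se.2 with ⟨h1, h2⟩
    by_cases hc : (relocs.foldl (fun acc addr => if se.1 ≤ addr ∧ addr < se.2 then acc + 1 else acc) (0 : Int)) <
        PySem.Int.floordiv (se.2 - se.1) 8
    · rw [if_pos hc, if_pos (h1 hc)]
    · rw [if_neg hc, if_neg (fun hb => hc (h2 hb))]
  rw [hfun]
  have := PySem.List.foldl_append_if
    (p := fun se : Int × Int =>
      decide (se.1 < se.2) &&
      decide ((pvBisectLeft (PySem.List.sorted relocs (fun a => a) false) se.2 : Int) -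
          (pvBisectLeft (PySem.List.sorted relocs (fun a => a) false) se.1 : Int) <
        PySem.Int.floordiv (se.2 - se.1) 8))
    (f := fun se : Int × Int => se) (l := ranges) (acc := [])
  rw [this]
  simp [List.map_id']
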